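-- pv_equiv track=rewrite | github.com/Tokyo113/leetcode_python | 中级班/chapter05/code_06_ChooseJob.py | chooseJobs
-- ===== SOURCE A (Python) =====
-- import functools
--
-- def cmp(a,b):
--     if a[0] < b[0] or (a[0]==b[0] and a[1]>b[1]):
--         return -1
--     elif a[0] == b[0] and a[1] == b[1]:
--         return 0
--     else:
--         return 1
--
-- def chooseJobs(job, ability):
--     if job == [] or ability == []:
--         return None
--     job.sort(key=functools.cmp_to_key(cmp))
--     jobMap = {}
--     jobMap[job[0][0]] = job[0][1]
--     pre = job[0][1]
--     for i in job[1:]: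
--         if jobMap.get(i[0]) is None and i[1] > pre:
--             jobMap[i[0]] = i[1]
--             pre = i[1]
--
--     res = []
--
--     for i in ability:
--         while i >= 0:
--             if jobMap.get(i) != None:
--                 res.append(jobMap.get(i))
--                 break
--             else:
--                 i -= 1
--     return res
-- ===== SOURCE B (Python) =====
-- def chooseJobs(job, ability):
--     if job == [] or ability == []:
--         return None
--     s = sorted(job, key=lambda p: (p[0], -p[1]))
--     frontier = [s[0]]              # (hardness, money), both strictly increasing
--     for p in s[1:]:
--         if p[0] != frontier[-1][0] and p[1] > frontier[-1][1]:
--             frontier.append(p)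
--     res = []
--     for a in ability:
--         lo, hi = 0, len(frontier)
--         while lo < hi:             # bisect_right over frontier hardnesses
--             mid = (lo + hi) // 2
--             if frontier[mid][0] <= a:
--                 lo = mid + 1
--             else:
--                 hi = mid
--         if lo > 0:
--             res.append(frontier[lo - 1][1])
--     return res
-- ===== Notes on version B (the rewrite author's own statement) =====
-- stated objective: faster
-- what changed: B replaces A's comparator sort + dict + per-ability linear descent (i, i-1, ..., 0 until a dict key hits) by a key-tuple sort, an explicit increasing frontier list, and a binary search for the best affordable job; Pre_ restricts to the natural domain of nonnegative job hardnesses, because A's descending probe stops at 0 and silently skips abilities whose only affordable jobs have negative hardness.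
-- outside the precondition, e.g. on chooseJobs([(-1, 5)], [0]): A returns [], B returns [5]
import Mathlib
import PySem

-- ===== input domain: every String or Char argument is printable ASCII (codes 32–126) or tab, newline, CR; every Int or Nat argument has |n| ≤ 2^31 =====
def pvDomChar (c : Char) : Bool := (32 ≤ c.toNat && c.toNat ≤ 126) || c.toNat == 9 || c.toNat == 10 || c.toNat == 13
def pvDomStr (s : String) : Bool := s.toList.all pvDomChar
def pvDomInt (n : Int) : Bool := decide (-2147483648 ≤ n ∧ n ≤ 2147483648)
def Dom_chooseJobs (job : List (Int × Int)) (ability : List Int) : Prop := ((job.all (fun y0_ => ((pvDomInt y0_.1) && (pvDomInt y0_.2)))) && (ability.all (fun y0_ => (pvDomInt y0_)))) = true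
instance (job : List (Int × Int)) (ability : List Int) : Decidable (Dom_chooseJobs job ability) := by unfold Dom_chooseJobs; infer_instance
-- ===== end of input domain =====

-- B replaces A's comparator sort + dict build + per-ability linear descent by a key-tuple sort,
-- an explicit frontier list and a binary search (objective: faster). A sorts `job` in place; the
-- equivalence proved here is about the RETURN value only (B does not mutate its argument).

-- ===== PORT A =====
def cmpA (a b : Int × Int) : Int :=
  if a.1 < b.1 ∨ (a.1 = b.1 ∧ a.2 > b.2) then -1
  else if a.1 = b.1 ∧ a.2 = b.2 then 0
  else 1

-- body of A's build loop ('for i in job[1:]')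
def stepA (s : PySem.Dict Int Int × Int) (i : Int × Int) : PySem.Dict Int Int × Int :=
  if s.1.get? i.1 = none ∧ i.2 > s.2 then (s.1.insert i.1 i.2, i.2) else s

-- A's inner while loop: descend i, i-1, ..., 0 until jobMap has the key (None below 0);
-- structural recursion on the fuel (i+1).toNat, which bounds the number of iterations exactly
def whileLookupGo (m : PySem.Dict Int Int) : Nat → Int → Option Int
  | 0, _ => none
  | n + 1, i =>
    if 0 ≤ i then
      match m.get? i with
      | some v => some v
      | none => whileLookupGo m n (i - 1)
    else none

def whileLookup (m : PySem.Dict Int Int) (i : Int) : Option Int :=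
  whileLookupGo m (i + 1).toNat i

def chooseJobs (job : List (Int × Int)) (ability : List Int) : Option (List Int) :=
  if job = [] ∨ ability = [] then none
  else
    -- job.sort(key=cmp_to_key(cmp)): Python's sort is stable, ported as a stable insertion by cmpA
    match job.foldl (fun acc x => PySem.List.insertBy (fun a b => decide (cmpA a b < 0)) x acc) [] with
    | [] => none  -- unreachable: the sorted list is a permutation of job ≠ []
    | j0 :: rest =>
      let st := rest.foldl stepA (PySem.Dict.empty.insert j0.1 j0.2, j0.2)
      some (ability.foldl
        (fun r i =>
          match whileLookup st.1 i with
          | some v => r ++ [v]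
          | none => r) [])

-- ===== PORT B =====
-- body of B's build loop; frontier[-1] ported as getLastD (frontier is never empty)
def stepB (k : List (Int × Int)) (p : Int × Int) : List (Int × Int) :=
  if p.1 ≠ (k.getLastD (0, 0)).1 ∧ p.2 > (k.getLastD (0, 0)).2 then k ++ [p] else k

-- B's inner while loop: bisect_right over the frontier hardnesses;
-- structural recursion on the fuel hi - lo, which bounds the number of iterations
def bsearchGo (kept : List (Int × Int)) (a : Int) : Nat → Nat → Nat → Nat
  | 0, lo, _ => lo
  | n + 1, lo, hi =>
    if lo < hi then
      let mid := (lo + hi) / 2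
      if (kept.getD mid (0, 0)).1 ≤ a then bsearchGo kept a n (mid + 1) hi
      else bsearchGo kept a n lo mid
    else lo

def bsearchLoop (kept : List (Int × Int)) (a : Int) (lo hi : Nat) : Nat :=
  bsearchGo kept a (hi - lo) lo hi

def chooseJobs_alt (job : List (Int × Int)) (ability : List Int) : Option (List Int) :=
  if job = [] ∨ ability = [] then none
  else
    match PySem.List.sorted2 job (fun p => p.1) (fun p => -p.2) with
    | [] => none  -- unreachable: sorted(job) is a permutation of job ≠ []
    | j0 :: rest =>
      let kept := rest.foldl stepB [j0]
      some (ability.foldl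
        (fun r a =>
          let lo := bsearchLoop kept a 0 kept.length
          if 0 < lo then r ++ [(kept.getD (lo - 1) (0, 0)).2]
          else r) [])

-- ===== PRECONDITION & SPEC =====
-- Pre_ restricts to the natural domain of nonnegative job hardnesses: A's descending probe
-- i, i-1, ..., 0 stops at 0, so on negative hardnesses it silently skips abilities whose only
-- affordable jobs have negative hardness — an artefact of A's loop that B does not reproduce.
def Pre_chooseJobs (job : List (Int × Int)) (ability : List Int) : Prop :=
  ∀ p ∈ job, 0 ≤ p.1
instance (job : List (Int × Int)) (ability : List Int) : Decidable (Pre_chooseJobs job ability) := by unfold Pre_chooseJobs; infer_instance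

def pvWitness_chooseJobs : (List (Int × Int)) × List Int := ([(1, 3), (2, 5)], [0, 2])

def Spec_chooseJobs (job : List (Int × Int)) (ability : List Int) (out : Option (List Int)) : Prop := out = chooseJobs_alt job ability
instance (job : List (Int × Int)) (ability : List Int) (out : Option (List Int)) : Decidable (Spec_chooseJobs job ability out) := by unfold Spec_chooseJobs; infer_instance

-- ===== CLAIM (what is proved, stated in full; the proofs are below) =====
def Claim_equal_chooseJobs : Prop := ∀ (job : List (Int × Int)) (ability : List Int), Dom_chooseJobs job ability → Pre_chooseJobs job ability → Spec_chooseJobs job ability (chooseJobs job ability)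

-- ===== LEMMAS AND PROOFS =====

-- A's comparator sort and B's key-tuple sort are the same stable insertion sort
theorem sortA_eq_sorted2 (job : List (Int × Int)) :
    job.foldl (fun acc x => PySem.List.insertBy (fun a b => decide (cmpA a b < 0)) x acc) [] =
    PySem.List.sorted2 job (fun p => p.1) (fun p => -p.2) := by
  unfold PySem.List.sorted2
  simp only []
  congr 1
  funext acc x
  congr 1
  funext a b
  simp only [cmpA]
  split_ifs with h1 h2 <;> simp_all <;> omega

theorem insertBy_pairwise {α : Type} (R : α → α → Prop) (before : α → α → Bool)
    (htrans : ∀ a b c, R a b → R b c → R a c)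
    (htrue : ∀ a b, before a b = true → R a b) (hfalse : ∀ a b, before a b = false → R b a)
    (x : α) (l : List α) (hl : l.Pairwise R) : (PySem.List.insertBy before x l).Pairwise R := by
  induction l with
  | nil => simp [PySem.List.insertBy]
  | cons y ys ih =>
    rw [PySem.List.insertBy]
    rcases List.pairwise_cons.mp hl with ⟨hy, hys⟩
    by_cases hb : before x y = true
    · simp only [hb, if_pos]
      refine List.pairwise_cons.mpr ⟨?_, hl⟩
      intro z hz
      rcases List.mem_cons.mp hz with rfl | hz
      · exact htrue _ _ hb
      · exact htrans _ _ _ (htrue _ _ hb) (hy z hz)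
    · simp only [hb, if_neg, Bool.not_eq_true]
      refine List.pairwise_cons.mpr ⟨?_, ih hys⟩
      intro z hz
      rcases (PySem.List.mem_insertBy before x z ys).mp hz with rfl | hz
      · exact hfalse _ _ (Bool.not_eq_true _ ▸ hb)
      · exact hy z hz

-- the sorted list is pairwise ordered by hardness asc, money desc
theorem sorted2_pairwise_lexle (job : List (Int × Int)) :
    (PySem.List.sorted2 job (fun p => p.1) (fun p => -p.2)).Pairwise
      (fun a b => a.1 < b.1 ∨ (a.1 = b.1 ∧ b.2 ≤ a.2)) := by
  unfold PySem.List.sorted2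
  have key : ∀ (acc : List (Int × Int)),
      acc.Pairwise (fun a b => a.1 < b.1 ∨ (a.1 = b.1 ∧ b.2 ≤ a.2)) →
      (job.foldl (fun acc x => PySem.List.insertBy
        (fun a b => decide (a.1 < b.1) || (!decide (b.1 < a.1) && decide (-a.2 < -b.2))) x acc) acc).Pairwise
        (fun a b => a.1 < b.1 ∨ (a.1 = b.1 ∧ b.2 ≤ a.2)) := by
    induction job with
    | nil => intro acc h; simpa using h
    | cons p ps ih =>
      intro acc h
      simp only [List.foldl_cons]
      apply ih
      apply insertBy_pairwise _ _ ?_ ?_ ?_ _ _ h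
      · rintro a b c (h1 | ⟨h1, h1'⟩) (h2 | ⟨h2, h2'⟩) <;> [left; left; left; right] <;> omega
      · intro a b hab
        simp only [Bool.or_eq_true, Bool.and_eq_true, Bool.not_eq_true', decide_eq_true_eq,
          decide_eq_false_iff_not] at hab
        omega
      · intro a b hab
        simp only [Bool.or_eq_false_iff, Bool.and_eq_false_iff, Bool.not_eq_false',
          decide_eq_true_eq, decide_eq_false_iff_not] at hab
        omega
  exact key [] (List.Pairwise.nil)

theorem dict_eq_of_items {κ ν : Type} {d e : PySem.Dict κ ν} (h : d.items = e.items) : d = e := by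
  cases d; cases e; cases h; rfl

theorem last_mem (kept : List (Int × Int)) (hne : kept ≠ []) : kept.getLastD (0,0) ∈ kept := by
  rcases List.eq_nil_or_concat kept with rfl | ⟨l', b, rfl⟩
  · exact absurd rfl hne
  · simp [List.concat_eq_append]

theorem last_max (kept : List (Int × Int)) (hk : (kept.map (·.1)).Pairwise (· < ·))
    (x : Int × Int) (hx : x ∈ kept) : x.1 ≤ (kept.getLastD (0,0)).1 := by
  rcases List.eq_nil_or_concat kept with rfl | ⟨l', b, rfl⟩
  · simp at hx
  · simp only [List.concat_eq_append] at *
    rw [List.getLastD_concat]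
    rcases List.mem_append.mp hx with hx | hx
    · have := (List.pairwise_append.mp (by simpa using hk)).2.2
      exact le_of_lt (this x.1 (List.mem_map_of_mem hx) b.1 (by simp))
    · simp at hx; simp [hx]

theorem mem_keys_iff_last (kept : List (Int × Int)) (hne : kept ≠ [])
    (hk : (kept.map (·.1)).Pairwise (· < ·)) (p : Int × Int)
    (hge : (kept.getLastD (0,0)).1 ≤ p.1) :
    (p.1 ∈ kept.map (·.1)) ↔ p.1 = (kept.getLastD (0,0)).1 := by
  constructor
  · intro h
    rcases List.mem_map.mp h with ⟨x, hx, hx1⟩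
    have := last_max kept hk x hx
    omega
  · intro h
    rw [h]
    exact List.mem_map_of_mem (last_mem kept hne)

-- elements of the frontier come from the initial frontier or the traversed list
theorem mem_foldl_stepB (rest : List (Int × Int)) : ∀ (kept : List (Int × Int)) (x : Int × Int),
    x ∈ rest.foldl stepB kept → x ∈ kept ∨ x ∈ rest := by
  induction rest with
  | nil => intro kept x hx; exact Or.inl hx
  | cons p rest' ih =>
    intro kept x hx
    simp only [List.foldl_cons] at hx
    rcases ih (stepB kept p) x hx with h | h
    · unfold stepB at h
      split_ifs at h with hc
      · rcases List.mem_append.mp h with h | h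
        · exact Or.inl h
        · simp at h; subst h; exact Or.inr (List.mem_cons_self)
      · exact Or.inl h
    · exact Or.inr (List.mem_cons_of_mem _ h)

-- the build phases agree: A's (dict, pre) fold carries exactly B's frontier list
theorem build_eq (rest : List (Int × Int)) : ∀ (kept : List (Int × Int)), kept ≠ [] →
    (kept.map (·.1)).Pairwise (· < ·) →
    (∀ p ∈ rest, (kept.getLastD (0,0)).1 ≤ p.1) →
    rest.Pairwise (fun a b => a.1 < b.1 ∨ (a.1 = b.1 ∧ b.2 ≤ a.2)) →
    rest.foldl stepA (PySem.Dict.mk kept, (kept.getLastD (0,0)).2) =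
      (PySem.Dict.mk (rest.foldl stepB kept), ((rest.foldl stepB kept).getLastD (0,0)).2)
    ∧ (rest.foldl stepB kept) ≠ []
    ∧ ((rest.foldl stepB kept).map (·.1)).Pairwise (· < ·) := by
  induction rest with
  | nil => intro kept hne hk _ _; exact ⟨rfl, hne, hk⟩
  | cons p rest' ih =>
    intro kept hne hk hlast hrest
    rcases List.pairwise_cons.mp hrest with ⟨hp, hrest'⟩
    have hgep : (kept.getLastD (0,0)).1 ≤ p.1 := hlast p (List.mem_cons_self)
    have hkeyiff := mem_keys_iff_last kept hne hk p hgep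
    have hkeys_mk : (PySem.Dict.mk kept).get? p.1 = none ↔ ¬ p.1 ∈ kept.map (·.1) := by
      rw [PySem.Dict.get?_eq_none_iff_not_mem_keys]
      simp [PySem.Dict.keys]
    simp only [List.foldl_cons]
    by_cases hc : p.1 ≠ (kept.getLastD (0,0)).1 ∧ p.2 > (kept.getLastD (0,0)).2
    · have hA : stepA (PySem.Dict.mk kept, (kept.getLastD (0,0)).2) p =
          (PySem.Dict.mk (kept ++ [p]), p.2) := by
        have hnone : (PySem.Dict.mk kept).get? p.1 = none := by
          rw [hkeys_mk]; intro hmem; exact hc.1 (hkeyiff.mp hmem)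
        have hnc : (PySem.Dict.mk kept).contains p.1 = false := by
          rw [PySem.Dict.contains_eq_isSome_get?, hnone]; rfl
        simp only [stepA, if_pos (And.intro hnone hc.2)]
        have hit := PySem.Dict.items_insert_of_not_contains (d := PySem.Dict.mk kept)
          (k := p.1) (v := p.2) hnc
        have : (PySem.Dict.mk kept).insert p.1 p.2 = PySem.Dict.mk (kept ++ [p]) := by
          apply dict_eq_of_items
          cases p
          simpa [PySem.Dict.items] using hit
        rw [this]
      have hB : stepB kept p = kept ++ [p] := by simp only [stepB, if_pos hc]
      rw [hA, hB]
      have hlt : (kept.getLastD (0,0)).1 < p.1 := lt_of_le_of_ne hgep (Ne.symm hc.1)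
      have hk' : ((kept ++ [p]).map (·.1)).Pairwise (· < ·) := by
        rw [List.map_append, List.pairwise_append]
        refine ⟨hk, by simp, ?_⟩
        intro x hx y hy
        simp at hy; subst hy
        rcases List.mem_map.mp hx with ⟨z, hz, rfl⟩
        exact lt_of_le_of_lt (last_max kept hk z hz) hlt
      have hlast' : ∀ q ∈ rest', ((kept ++ [p]).getLastD (0,0)).1 ≤ q.1 := by
        intro q hq
        rw [List.getLastD_concat]
        rcases hp q hq with h | ⟨h, _⟩ <;> omega
      have := ih (kept ++ [p]) (by simp) hk' hlast' hrest'
      simpa [List.getLastD_concat] using this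
    · have hA : stepA (PySem.Dict.mk kept, (kept.getLastD (0,0)).2) p =
          (PySem.Dict.mk kept, (kept.getLastD (0,0)).2) := by
        simp only [stepA]
        rw [if_neg]
        intro ⟨h1, h2⟩
        apply hc
        refine ⟨?_, h2⟩
        rw [hkeys_mk] at h1
        intro he; exact h1 (hkeyiff.mpr he)
      have hB : stepB kept p = kept := by simp only [stepB, if_neg hc]
      rw [hA, hB]
      exact ih kept hne hk (fun q hq => hlast q (List.mem_cons_of_mem _ hq)) hrest'

-- the binary search maintains and returns the bisect_right boundary
theorem bsearchGo_spec (kept : List (Int × Int)) (a : Int) : ∀ (n lo hi : Nat), hi - lo ≤ n → lo ≤ hi → hi ≤ kept.length →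
    (lo = 0 ∨ (kept.getD (lo - 1) (0, 0)).1 ≤ a) → (hi = kept.length ∨ a < (kept.getD hi (0, 0)).1) →
    bsearchGo kept a n lo hi ≤ kept.length ∧
    (bsearchGo kept a n lo hi = 0 ∨ (kept.getD (bsearchGo kept a n lo hi - 1) (0, 0)).1 ≤ a) ∧
    (bsearchGo kept a n lo hi = kept.length ∨ a < (kept.getD (bsearchGo kept a n lo hi) (0, 0)).1) := by
  intro n
  induction n with
  | zero =>
    intro lo hi hfuel hlo hhi h1 h2
    have : lo = hi := by omega
    subst this
    exact ⟨hhi, h1, h2⟩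
  | succ n ih =>
    intro lo hi hfuel hlo hhi h1 h2
    rw [bsearchGo]
    by_cases hlt : lo < hi
    · rw [if_pos hlt]
      by_cases hle : (kept.getD ((lo + hi) / 2) (0, 0)).1 ≤ a
      · rw [if_pos hle]
        exact ih ((lo + hi) / 2 + 1) hi (by omega) (by omega) hhi (Or.inr (by simpa using hle)) h2
      · rw [if_neg hle]
        exact ih lo ((lo + hi) / 2) (by omega) (by omega) (by omega) h1 (Or.inr (by omega))
    · rw [if_neg hlt]
      have : lo = hi := by omega
      subst this
      exact ⟨hhi, h1, h2⟩

theorem bsearch_spec (kept : List (Int × Int)) (a : Int) (lo hi : Nat) (hlo : lo ≤ hi) (hhi : hi ≤ kept.length)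
    (h1 : lo = 0 ∨ (kept.getD (lo - 1) (0, 0)).1 ≤ a) (h2 : hi = kept.length ∨ a < (kept.getD hi (0, 0)).1) :
    bsearchLoop kept a lo hi ≤ kept.length ∧
    (bsearchLoop kept a lo hi = 0 ∨ (kept.getD (bsearchLoop kept a lo hi - 1) (0, 0)).1 ≤ a) ∧
    (bsearchLoop kept a lo hi = kept.length ∨ a < (kept.getD (bsearchLoop kept a lo hi) (0, 0)).1) := by
  unfold bsearchLoop
  exact bsearchGo_spec kept a (hi - lo) lo hi le_rfl hlo hhi h1 h2

-- the descent loop returns exactly the entry at the bisect_right boundary (if nonneg)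
theorem whileLookup_eq (kept : List (Int × Int)) (hk : (kept.map (·.1)).Pairwise (· < ·))
    (r : Nat) (hr : r ≤ kept.length)
    (a : Int) :
    (r = 0 ∨ (kept.getD (r - 1) (0, 0)).1 ≤ a) → (r = kept.length ∨ a < (kept.getD r (0, 0)).1) →
    whileLookup (PySem.Dict.mk kept) a =
      (if 0 < r ∧ 0 ≤ (kept.getD (r - 1) (0, 0)).1 then some ((kept.getD (r - 1) (0, 0)).2)
       else none) := by
  have hmono : ∀ (i j : Nat) (hi : i < kept.length) (hj : j < kept.length), i ≤ j →
      (kept[i]).1 ≤ (kept[j]).1 := by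
    intro i j hi hj hij
    rcases Nat.lt_or_ge i j with h | h
    · have := (List.pairwise_iff_getElem.mp hk) i j (by simpa using hi) (by simpa using hj) h
      simp only [List.getElem_map] at this
      exact le_of_lt this
    · have : i = j := by omega
      subst this; exact le_refl _
  have hkeysnone : ∀ (b : Int), ((PySem.Dict.mk kept).get? b = none ↔ ¬ b ∈ kept.map (·.1)) := by
    intro b
    rw [PySem.Dict.get?_eq_none_iff_not_mem_keys]
    simp [PySem.Dict.keys]
  have main : ∀ (n : Nat) (b : Int), (b + 1).toNat ≤ n →
      (r = 0 ∨ (kept.getD (r - 1) (0, 0)).1 ≤ b) → (r = kept.length ∨ b < (kept.getD r (0, 0)).1) →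
      whileLookupGo (PySem.Dict.mk kept) n b =
        (if 0 < r ∧ 0 ≤ (kept.getD (r - 1) (0, 0)).1 then some ((kept.getD (r - 1) (0, 0)).2)
         else none) := by
    intro n
    induction n with
    | zero =>
      intro b hb h1 h2
      rw [whileLookupGo]
      rw [if_neg]
      rintro ⟨hrpos, hnn⟩
      rcases h1 with h1 | h1
      · omega
      · omega
    | succ n ih =>
      intro b hb h1 h2
      by_cases h0 : 0 ≤ b
      · rw [whileLookupGo, if_pos h0]
        cases hg : (PySem.Dict.mk kept).get? b with
        | some v =>
          have hmem : (b, v) ∈ kept := by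
            have := PySem.Dict.mem_items_of_get?_eq_some _ hg
            simpa [PySem.Dict.items] using this
          rcases List.mem_iff_getElem.mp hmem with ⟨i, hi, hik⟩
          have hia : (kept[i]).1 = b := by rw [hik]
          have hrpos : 0 < r := by
            rcases Nat.eq_zero_or_pos r with hr0 | hr
            · subst hr0
              rcases h2 with h2 | h2
              · omega
              · rw [List.getD_eq_getElem kept (0,0) (by omega)] at h2
                have := hmono 0 i (by omega) hi (by omega)
                omega
            · exact hr
          have hilt : i < r := by
            by_contra hge
            have hrlen : r < kept.length := by omega
            rcases h2 with h2 | h2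
            · omega
            · rw [List.getD_eq_getElem kept (0,0) hrlen] at h2
              have := hmono r i hrlen hi (by omega)
              omega
          have hr1lt : r - 1 < kept.length := by omega
          have hr1a : (kept[r-1]).1 = b := by
            have hle : (kept.getD (r - 1) (0, 0)).1 ≤ b := by rcases h1 with h1 | h1 <;> omega
            rw [List.getD_eq_getElem kept (0,0) hr1lt] at hle
            have := hmono i (r-1) hi hr1lt (by omega)
            omega
          have hir1 : i = r - 1 := by
            by_contra hne
            have hilt' : i < r - 1 := by omega
            have := (List.pairwise_iff_getElem.mp hk) i (r-1) (by simpa using hi)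
              (by simpa using hr1lt) hilt'
            simp only [List.getElem_map] at this
            omega
          subst hir1
          rw [if_pos ⟨hrpos, by rw [List.getD_eq_getElem kept (0,0) hr1lt]; omega⟩]
          rw [List.getD_eq_getElem kept (0,0) hr1lt, hik]
        | none =>
          have hnb : ¬ b ∈ kept.map (·.1) := (hkeysnone b).mp hg
          have h1' : r = 0 ∨ (kept.getD (r - 1) (0, 0)).1 ≤ b - 1 := by
            rcases Nat.eq_zero_or_pos r with hr0 | hrpos
            · exact Or.inl hr0
            · rcases h1 with h1 | h1
              · omega
              · right
                have hr1lt : r - 1 < kept.length := by omega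
                rw [List.getD_eq_getElem kept (0,0) hr1lt] at h1 ⊢
                have : (kept[r-1]).1 ≠ b := by
                  intro he
                  exact hnb (by rw [← he]; exact List.mem_map_of_mem (List.getElem_mem _))
                omega
          have h2' : r = kept.length ∨ b - 1 < (kept.getD r (0, 0)).1 := by
            rcases h2 with h2 | h2
            · exact Or.inl h2
            · right; omega
          exact ih (b - 1) (by omega) h1' h2'
      · rw [whileLookupGo, if_neg h0]
        rw [if_neg]
        rintro ⟨hrpos, hnn⟩
        rcases h1 with h1 | h1
        · omega
        · have hr1lt : r - 1 < kept.length := by omega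
          omega
  intro h1 h2
  rw [whileLookup]
  exact main ((a + 1).toNat) a le_rfl h1 h2

-- ===== VERDICT (by name: the statement is the Claim_ definition above) =====
theorem chooseJobs_spec : Claim_equal_chooseJobs := by
  unfold Claim_equal_chooseJobs Spec_chooseJobs
  intro job ability _dom hpre
  unfold chooseJobs chooseJobs_alt
  by_cases hempty : job = [] ∨ ability = []
  · rw [if_pos hempty, if_pos hempty]
  · rw [if_neg hempty, if_neg hempty, sortA_eq_sorted2]
    cases hs : PySem.List.sorted2 job (fun p => p.1) (fun p => -p.2) with
    | nil => rfl
    | cons j0 rest =>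
      have hpair := sorted2_pairwise_lexle job
      rw [hs] at hpair
      rcases List.pairwise_cons.mp hpair with ⟨hj0, hrest⟩
      -- under Pre_, every element of the frontier has nonnegative hardness
      have hsortmem : ∀ x ∈ (j0 :: rest), x ∈ job := by
        intro x hx
        have := PySem.List.sorted2_perm job (fun p => p.1) (fun p => -p.2) (rev := false)
        rw [hs] at this
        exact this.mem_iff.mp hx
      have hkeptnn : ∀ x ∈ rest.foldl stepB [j0], 0 ≤ x.1 := by
        intro x hx
        rcases mem_foldl_stepB rest [j0] x hx with h | h
        · have hx1 : x = j0 := by simpa using h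
          rw [hx1]
          exact hpre _ (hsortmem j0 (List.mem_cons_self))
        · exact hpre _ (hsortmem x (List.mem_cons_of_mem _ h))
      have hinit : PySem.Dict.empty.insert j0.1 j0.2 = PySem.Dict.mk [j0] := by
        apply dict_eq_of_items
        have := PySem.Dict.items_insert_of_not_contains (d := PySem.Dict.empty)
          (k := j0.1) (v := j0.2) (by simp)
        cases j0
        simpa [PySem.Dict.items, PySem.Dict.empty] using this
      obtain ⟨hfold, hne', hk'⟩ := build_eq rest [j0] (by simp) (by simp)
        (by intro p hp; have he : (([j0] : List (Int × Int)).getLastD (0,0)) = j0 := rfl; rw [he]; rcases hj0 p hp with h | ⟨h, _⟩ <;> omega)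
        hrest
      simp only []
      rw [hinit]
      have hstA : rest.foldl stepA (PySem.Dict.mk [j0], j0.2) =
          (PySem.Dict.mk (rest.foldl stepB [j0]), ((rest.foldl stepB [j0]).getLastD (0,0)).2) := by
        have : j0.2 = (([j0] : List (Int × Int)).getLastD (0,0)).2 := rfl
        rw [this]
        exact hfold
      rw [hstA]
      congr 1
      have hfun : (fun (r : List Int) (i : Int) =>
            match whileLookup (PySem.Dict.mk (rest.foldl stepB [j0])) i with
            | some v => r ++ [v]
            | none => r) =
          (fun (r : List Int) (a : Int) =>
            let lo := bsearchLoop (rest.foldl stepB [j0]) a 0 (rest.foldl stepB [j0]).length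
            if 0 < lo then r ++ [((rest.foldl stepB [j0]).getD (lo - 1) (0, 0)).2]
            else r) := by
        funext rl a
        obtain ⟨hr, h1, h2⟩ := bsearch_spec (rest.foldl stepB [j0]) a 0 (rest.foldl stepB [j0]).length
          (by omega) le_rfl (Or.inl rfl) (Or.inl rfl)
        rw [whileLookup_eq (rest.foldl stepB [j0]) hk' _ hr a h1 h2]
        set kept := rest.foldl stepB [j0] with hkdef
        set lo := bsearchLoop kept a 0 kept.length with hlodef
        by_cases hlo : 0 < lo
        · have hnn : 0 ≤ (kept.getD (lo - 1) (0, 0)).1 := by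
            have hlt : lo - 1 < kept.length := by omega
            rw [List.getD_eq_getElem kept (0,0) hlt]
            exact hkeptnn _ (List.getElem_mem _)
          rw [if_pos ⟨hlo, hnn⟩]
          simp only [if_pos hlo]
        · rw [if_neg (by intro h; exact hlo h.1)]
          simp only [if_neg hlo]
      rw [hfun]
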